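-- pv_equiv track=rewrite | github.com/kimerikal-games/AoC-2025 | day/03/program.py | part2
-- ===== SOURCE A (Python) =====
-- PART2_RESULT_LENGTH = 12
--
-- def part2(banks: list[list[int]]) -> int:
--     total_joltage = 0
--
--     for bank in banks:
--         result: list[int] = []
--
--         for digit in reversed(bank):
--             result.append(digit)
--
--             if len(result) > PART2_RESULT_LENGTH:
--                 to_remove = 0
--
--                 for i in range(len(result) - 1, -1, -1):
--                     if result[i - 1] > result[i]:
--                         to_remove = i
--                         break
--
--                 result.pop(to_remove)
--
--         joltage = 0
--         for digit in reversed(result):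
--             joltage = joltage * 10 + digit
--
--         total_joltage += joltage
--
--     return total_joltage
-- ===== SOURCE B (Python) =====
-- PART2_RESULT_LENGTH = 12
--
-- def part2(banks: list[list[int]]) -> int:
--     K = PART2_RESULT_LENGTH
--     total_joltage = 0
--
--     for bank in banks:
--         # Bottom-up dynamic programming over suffixes: row[k] is the
--         # lexicographically greatest k-digit subsequence of the current suffix.
--         row = [[] for _ in range(K + 1)]
--         m = 0  # length of the current suffix
--         for d in reversed(bank):
--             new_row = []
--             for k in range(K + 1):
--                 if k == 0:
--                     new_row.append([])
--                 elif m < k: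
--                     new_row.append([d] + row[k])
--                 else:
--                     new_row.append(max(row[k], [d] + row[k - 1]))
--             row = new_row
--             m += 1
--
--         joltage = 0
--         for d in row[K]:
--             joltage = joltage * 10 + d
--         total_joltage += joltage
--
--     return total_joltage
-- ===== Notes on version B (the rewrite author's own statement) =====
-- stated objective: alternative
-- what changed: A's greedy maintenance of a 12-digit window (repeated backward scans to delete the first ascent) is replaced by a bottom-up dynamic program over suffixes that keeps, for every k = 0..12, the lexicographically greatest k-digit subsequence via the recurrence best(d::s,k) = max(best(s,k), d::best(s,k-1)).
import Mathlib
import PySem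

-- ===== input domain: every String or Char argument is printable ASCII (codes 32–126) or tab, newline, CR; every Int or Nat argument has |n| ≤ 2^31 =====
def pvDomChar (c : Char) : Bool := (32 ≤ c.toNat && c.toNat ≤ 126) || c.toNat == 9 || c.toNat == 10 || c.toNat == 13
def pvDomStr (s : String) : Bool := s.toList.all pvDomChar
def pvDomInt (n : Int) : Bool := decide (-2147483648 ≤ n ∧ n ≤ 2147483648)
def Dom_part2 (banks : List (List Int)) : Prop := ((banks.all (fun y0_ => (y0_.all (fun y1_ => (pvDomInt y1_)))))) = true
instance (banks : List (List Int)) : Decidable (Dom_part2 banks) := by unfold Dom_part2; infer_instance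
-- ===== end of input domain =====

-- B replaces A's greedy delete-the-first-ascent maintenance of a 12-digit window by a
-- bottom-up dynamic program over suffixes computing, for every k ≤ 12, the
-- lexicographically greatest k-digit subsequence (objective: alternative, same result).

-- ===== PORT A =====
-- one pass of A's inner loop body: append the digit, and if the window exceeds 12
-- find the pop index by A's backward scan (result[i-1] > result[i], wraparound at i = 0)
def part2_stepA (result : List Int) (digit : Int) : List Int :=
  let result := result ++ [digit]
  if 12 < result.length then
    let to_remove : Int :=
      (((PySem.List.pyRange ((result.length : Int) - 1) (-1) (-1)).find? (fun i =>
          match PySem.List.pyGet? result (i - 1), PySem.List.pyGet? result i with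
          | some a, some b => decide (a > b)
          | _, _ => false)).getD 0)
    match PySem.List.pop? result to_remove with
    | some p => p.2
    | none => result
  else result

def part2 (banks : List (List Int)) : Int :=
  banks.foldl (fun total_joltage bank =>
    let result := bank.reverse.foldl part2_stepA []
    let joltage := result.reverse.foldl (fun j d => j * 10 + d) 0
    total_joltage + joltage) 0

-- ===== PORT B =====
-- Python list '<' (lexicographic, a strict prefix is smaller)
def pyListLt : List Int → List Int → Bool
  | _, [] => false
  | [], _ :: _ => true
  | a :: u, b :: v => a < b || (a == b && pyListLt u v)

-- one step of B's DP: st = (row, m) where row[k] is the lexicographically greatest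
-- k-digit subsequence of the current suffix (of length m); prepend digit d
def part2_stepB (st : List (List Int) × Nat) (d : Int) : List (List Int) × Nat :=
  ((List.range 13).map (fun k =>
      if k = 0 then []
      else if st.2 < k then d :: st.1.getD k []
      else
        let cand := d :: st.1.getD (k - 1) []
        if pyListLt (st.1.getD k []) cand then cand else st.1.getD k []),
   st.2 + 1)

def part2_alt (banks : List (List Int)) : Int :=
  banks.foldl (fun total_joltage bank =>
    let st := bank.reverse.foldl part2_stepB ((List.range 13).map (fun _ => ([] : List Int)), 0)
    let joltage := (st.1.getD 12 []).foldl (fun j d => j * 10 + d) 0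
    total_joltage + joltage) 0

-- ===== PRECONDITION & SPEC =====
def Spec_part2 (banks : List (List Int)) (out : Int) : Prop := out = part2_alt banks
instance (banks : List (List Int)) (out : Int) : Decidable (Spec_part2 banks out) := by unfold Spec_part2; infer_instance

-- ===== CLAIM (what is proved, stated in full; the proofs are below) =====
def Claim_equal_part2 : Prop := ∀ (banks : List (List Int)), Dom_part2 banks → Spec_part2 banks (part2 banks)

-- ===== LEMMAS AND PROOFS =====

-- `part2_best s k` : the lexicographically greatest subsequence of s of length min k |s|
def part2_maxC (x y : List Int) : List Int := if pyListLt x y then y else x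

def part2_best : List Int → Nat → List Int
  | [], _ => []
  | d :: s, k =>
    if s.length + 1 ≤ k then d :: s
    else if k = 0 then []
    else part2_maxC (part2_best s k) (d :: part2_best s (k - 1))

-- first strict ascent position of o (j with o[j] < o[j+1]), else |o| - 1
def part2_J : List Int → Nat
  | [] => 0
  | [_] => 0
  | a :: b :: t => if a < b then 0 else part2_J (b :: t) + 1

-- remove the first strict ascent (else the last element)
def part2_trim : List Int → List Int
  | [] => []
  | [_] => []
  | a :: b :: t => if a < b then b :: t else a :: part2_trim (b :: t)

-- the predicate of A's backward scan, named for the proofs (defeq to the lambda in part2_stepA)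
def part2_pred (r : List Int) (i : Int) : Bool :=
  match PySem.List.pyGet? r (i - 1), PySem.List.pyGet? r i with
  | some a, some b => decide (a > b)
  | _, _ => false

theorem pyListLt_irrefl (x : List Int) : pyListLt x x = false := by
  induction x with
  | nil => rfl
  | cons a u ih => simp [pyListLt, ih]

theorem pyListLt_trans {x y z : List Int} (h1 : pyListLt x y = true) (h2 : pyListLt y z = true) :
    pyListLt x z = true := by
  induction x generalizing y z with
  | nil =>
    cases z with
    | nil => cases y <;> simp_all [pyListLt]
    | cons c w => simp [pyListLt]
  | cons a u ih =>
    cases y with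
    | nil => simp [pyListLt] at h1
    | cons b v =>
      cases z with
      | nil => simp [pyListLt] at h2
      | cons c w =>
        simp only [pyListLt, Bool.or_eq_true, Bool.and_eq_true, decide_eq_true_eq, beq_iff_eq] at *
        rcases h1 with h1 | ⟨rfl, h1⟩ <;> rcases h2 with h2 | ⟨rfl, h2⟩
        · exact Or.inl (lt_trans h1 h2)
        · exact Or.inl h1
        · exact Or.inl h2
        · exact Or.inr ⟨rfl, ih h1 h2⟩

theorem pyListLt_neg_trans {x y z : List Int} (h1 : pyListLt x y = false) (h2 : pyListLt y z = false) :
    pyListLt x z = false := by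
  induction x generalizing y z with
  | nil =>
    cases y with
    | nil => cases z <;> simp_all [pyListLt]
    | cons b v => simp [pyListLt] at h1
  | cons a u ih =>
    cases z with
    | nil => rfl
    | cons c w =>
      cases y with
      | nil => simp [pyListLt] at h2
      | cons b v =>
        simp only [pyListLt, Bool.or_eq_false_iff, Bool.and_eq_false_iff, decide_eq_false_iff_not,
          beq_eq_false_iff_ne, ne_eq] at *
        refine ⟨by omega, ?_⟩
        by_cases hac : a = c
        · subst hac
          have hab : a = b := by omega
          subst hab
          rcases h1.2 with h | h
          · omega
          · rcases h2.2 with h' | h'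
            · omega
            · exact Or.inr (ih h h')
        · exact Or.inl hac

theorem pyListLt_antisymm {x y : List Int} (h1 : pyListLt x y = false) (h2 : pyListLt y x = false) :
    x = y := by
  induction x generalizing y with
  | nil => cases y with
    | nil => rfl
    | cons b v => simp [pyListLt] at h1
  | cons a u ih =>
    cases y with
    | nil => simp [pyListLt] at h2
    | cons b v =>
      simp only [pyListLt, Bool.or_eq_false_iff, Bool.and_eq_false_imp, decide_eq_false_iff_not,
        beq_iff_eq] at h1 h2
      have hab : a = b := by omega
      subst hab
      have := ih (h1.2 rfl) (h2.2 rfl)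
      rw [this]

theorem pyListLt_cons_head {c b : Int} {w t : List Int} (h : pyListLt (c :: w) (b :: t) = false) :
    ¬ c < b := by
  simp only [pyListLt, Bool.or_eq_false_iff, decide_eq_false_iff_not] at h
  exact h.1

theorem pyListLt_cons_self (d : Int) (u v : List Int) :
    pyListLt (d :: u) (d :: v) = pyListLt u v := by
  simp [pyListLt]

theorem pyListLt_cons_of_lt {a b : Int} (h : b < a) (u v : List Int) :
    pyListLt (a :: u) (b :: v) = false := by
  simp only [pyListLt, Bool.or_eq_false_iff, Bool.and_eq_false_iff, decide_eq_false_iff_not,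
    beq_eq_false_iff_ne, ne_eq]
  constructor
  · omega
  · left; omega

theorem part2_maxC_eq_or (x y : List Int) : part2_maxC x y = x ∨ part2_maxC x y = y := by
  unfold part2_maxC; split <;> simp

theorem part2_maxC_not_lt_left {x y t : List Int} (h : pyListLt x t = false) :
    pyListLt (part2_maxC x y) t = false := by
  unfold part2_maxC
  split
  · rename_i hxy
    by_contra hyt
    simp only [Bool.not_eq_false] at hyt
    have := pyListLt_trans hxy hyt
    rw [h] at this
    exact Bool.false_ne_true this
  · exact h

theorem part2_maxC_not_lt_right {x y t : List Int} (h : pyListLt y t = false) :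
    pyListLt (part2_maxC x y) t = false := by
  unfold part2_maxC
  split
  · exact h
  · rename_i hxy
    simp only [Bool.not_eq_true] at hxy
    exact pyListLt_neg_trans hxy h

theorem part2_best_zero (s : List Int) : part2_best s 0 = [] := by
  cases s <;> simp [part2_best]

theorem part2_best_of_le {s : List Int} {k : Nat} (h : s.length ≤ k) : part2_best s k = s := by
  cases s with
  | nil => rfl
  | cons d t => simp only [part2_best] ; rw [if_pos (by simpa using h)]

theorem part2_best_cons {s : List Int} {k : Nat} (d : Int) (h1 : k ≤ s.length) (h2 : k ≠ 0) :
    part2_best (d :: s) k = part2_maxC (part2_best s k) (d :: part2_best s (k - 1)) := by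
  simp only [part2_best]
  rw [if_neg (by omega), if_neg h2]

theorem part2_best_length (s : List Int) (k : Nat) : (part2_best s k).length = min k s.length := by
  induction s generalizing k with
  | nil => simp [part2_best]
  | cons d t ih =>
    by_cases h : t.length + 1 ≤ k
    · rw [part2_best_of_le (by simpa using h)]; simp; omega
    · by_cases hk : k = 0
      · subst hk; simp [part2_best_zero]
      · rw [part2_best_cons d (by omega) hk]
        rcases part2_maxC_eq_or (part2_best t k) (d :: part2_best t (k - 1)) with he | he <;>
          rw [he] <;> simp [ih] <;> omega

theorem part2_best_max {s t : List Int} {k : Nat} (hsub : t.Sublist s)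
    (hlen : t.length = min k s.length) : pyListLt (part2_best s k) t = false := by
  induction s generalizing k t with
  | nil =>
    have : t = [] := List.eq_nil_of_sublist_nil hsub
    subst this; rfl
  | cons d s' ih =>
    by_cases h : s'.length + 1 ≤ k
    · rw [part2_best_of_le (by simpa using h)]
      have : t = d :: s' := hsub.eq_of_length (by simp at hlen ⊢; omega)
      subst this; exact pyListLt_irrefl _
    · by_cases hk : k = 0
      · subst hk
        have : t = [] := by
          have h0 : t.length = 0 := by simpa using hlen
          exact List.length_eq_zero_iff.mp h0
        subst this; simp [part2_best_zero, pyListLt]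
      · rw [part2_best_cons d (by omega) hk]
        have hmin : t.length = k := by simp at hlen; omega
        cases hsub with
        | cons _ h' =>
          exact part2_maxC_not_lt_left (ih h' (by simp at hlen ⊢; omega))
        | cons₂ _ h' =>
          rename_i t'
          have ht' : pyListLt (part2_best s' (k-1)) t' = false :=
            ih h' (by simp at hlen ⊢; omega)
          refine part2_maxC_not_lt_right ?_
          rw [pyListLt_cons_self]
          exact ht'

theorem part2_J_lt (o : List Int) (h : o ≠ []) : part2_J o < o.length := by
  induction o using part2_J.induct with
  | case1 => simp at h
  | case2 x => simp [part2_J]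
  | case3 a b t hab => simp only [part2_J, if_pos hab]; simp
  | case4 a b t hab ih =>
    simp only [part2_J, if_neg hab]
    have := ih (by simp)
    simp only [List.length_cons] at this ⊢
    omega

theorem part2_trim_eq_eraseIdx (o : List Int) : part2_trim o = o.eraseIdx (part2_J o) := by
  induction o using part2_J.induct with
  | case1 => rfl
  | case2 x => rfl
  | case3 a b t hab => simp [part2_trim, part2_J, if_pos hab]
  | case4 a b t hab ih =>
    simp [part2_trim, part2_J, if_neg hab, ih]

theorem part2_trim_length (o : List Int) (h : o ≠ []) :
    (part2_trim o).length = o.length - 1 := by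
  rw [part2_trim_eq_eraseIdx, List.length_eraseIdx]
  rw [if_pos (part2_J_lt o h)]

-- the heart: removing the first ascent (else last) preserves every best-j, j < |o|
theorem part2_star (o : List Int) (j : Nat) (h : j + 1 ≤ o.length) :
    part2_best (part2_trim o) j = part2_best o j := by
  induction o using part2_trim.induct generalizing j with
  | case1 => simp at h
  | case2 x =>
    have : j = 0 := by simp at h; omega
    subst this
    simp [part2_best_zero]
  | case3 a b t hab =>
    -- trim (a :: b :: t) = b :: t,  a < b
    simp only [part2_trim, if_pos hab]
    rcases Nat.eq_zero_or_pos j with rfl | hj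
    · simp [part2_best_zero]
    · have hjle : j ≤ (b :: t).length := by simpa using h
      rw [part2_best_cons a hjle (by omega)]
      rcases Nat.lt_or_ge j (b :: t).length with hlt | hge
      · -- j < |b::t| : the candidate starting with a loses
        have hbest := part2_best_length (b :: t) j
        rw [Nat.min_eq_left (by omega)] at hbest
        obtain ⟨c, w, hcw⟩ : ∃ c w, part2_best (b :: t) j = c :: w := by
          cases hbt : part2_best (b :: t) j with
          | nil => rw [hbt] at hbest; simp at hbest; omega
          | cons c w => exact ⟨c, w, rfl⟩
        have htake : (List.take j (b :: t)).Sublist (b :: t) := List.take_sublist j _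
        have htlen : (List.take j (b :: t)).length = min j (b :: t).length := by
          simp
        have hnl := part2_best_max htake htlen
        rw [hcw] at hnl
        obtain ⟨j', rfl⟩ : ∃ j', j = j' + 1 := ⟨j - 1, by omega⟩
        rw [List.take_succ_cons] at hnl
        have hbc : ¬ c < b := pyListLt_cons_head hnl
        have hac : a < c := by omega
        unfold part2_maxC
        rw [hcw, pyListLt_cons_of_lt hac]
        simp
      · -- j = |b::t| : best (b::t) j = b::t itself and it beats a-led candidate
        have hj' : j = (b :: t).length := by omega
        rw [part2_best_of_le (le_of_eq hj'.symm)]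
        unfold part2_maxC
        rw [pyListLt_cons_of_lt hab]
        simp
  | case4 a b t hab ih =>
    -- trim (a :: b :: t) = a :: trim (b :: t),  ¬ a < b
    simp only [part2_trim, if_neg hab]
    rcases Nat.eq_zero_or_pos j with rfl | hj
    · simp [part2_best_zero]
    · have hjle : j ≤ (b :: t).length := by simpa using h
      have htl : (part2_trim (b :: t)).length = (b :: t).length - 1 :=
        part2_trim_length _ (by simp)
      rw [part2_best_cons a hjle (by omega)]
      rcases Nat.lt_or_ge j (b :: t).length with hlt | hge
      · -- j ≤ |trim (b::t)| : recurrence on both sides, IH twice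
        rw [part2_best_cons a (by omega) (by omega)]
        rw [ih j (by omega), ih (j - 1) (by omega)]
      · -- j = |b::t| = |trim (b::t)| + 1
        have hj' : j = (b :: t).length := by omega
        have hlen2 : (a :: part2_trim (b :: t)).length = j := by
          simp only [List.length_cons] at hj' htl ⊢
          omega
        rw [part2_best_of_le (le_of_eq hlen2)]
        have hbt_best : part2_best (b :: t) (j - 1) = part2_trim (b :: t) := by
          rw [← ih (j - 1) (by omega)]
          exact part2_best_of_le (by omega)
        rw [part2_best_of_le (le_of_eq hj'.symm), hbt_best]
        unfold part2_maxC
        rcases (by omega : b < a ∨ b = a) with hba | hba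
        · rw [if_pos (by simp [pyListLt, hba])]
        · subst hba
          split
          · rfl
          · rename_i hnlt
            rw [pyListLt_cons_self] at hnlt
            simp only [Bool.not_eq_true] at hnlt
            have h1 : pyListLt (part2_trim (b :: t)) t = false := by
              rw [← hbt_best]
              refine part2_best_max (List.sublist_cons_self b t) ?_
              simp only [List.length_cons] at hj' ⊢
              omega
            have heq := pyListLt_antisymm h1 hnlt
            rw [heq]

-- nesting: re-bests of the best-K window agree with bests of the full list
theorem part2_nest (s : List Int) (K j : Nat) (h : j ≤ K) :
    part2_best (part2_best s K) j = part2_best s j := by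
  induction s generalizing j with
  | nil => simp [part2_best]
  | cons d s' ih =>
    by_cases hle : (d :: s').length ≤ K
    · rw [part2_best_of_le hle]
    · by_cases hK : K = 0
      · subst hK
        have : j = 0 := by omega
        subst this
        simp [part2_best_zero]
    -- K ≥ 1, |s'| ≥ K
      · have hs' : K ≤ s'.length := by simp at hle; omega
        have hKtrim : part2_best (d :: s') K = part2_trim (d :: part2_best s' K) := by
          have hlen : (part2_best s' K).length = K := by
            rw [part2_best_length, Nat.min_eq_left hs']
          have hstar := part2_star (d :: part2_best s' K) K (by simp [hlen])
          have htl : (part2_trim (d :: part2_best s' K)).length = K := by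
            rw [part2_trim_length _ (by simp)]; simp [hlen]
          rw [part2_best_of_le (le_of_eq htl)] at hstar
          rw [hstar, part2_best_cons d (le_of_eq hlen.symm) hK]
          rw [ih K le_rfl, ih (K - 1) (by omega)]
          rw [part2_best_cons d hs' hK]
        rcases Nat.eq_zero_or_pos j with rfl | hj
        · simp [part2_best_zero]
        · rw [hKtrim]
          have hlen : (part2_best s' K).length = K := by
            rw [part2_best_length, Nat.min_eq_left hs']
          rw [part2_star (d :: part2_best s' K) j (by simp [hlen]; omega)]
          rw [part2_best_cons d (by omega) (by omega)]
          rw [ih j h, ih (j - 1) (by omega)]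
          rw [part2_best_cons d (by omega) (by omega)]

-- A's one-step window maintenance computes best (d :: s) K
theorem part2_astep {s : List Int} {K : Nat} (d : Int) (h1 : K ≤ s.length) (h2 : K ≠ 0) :
    part2_trim (d :: part2_best s K) = part2_best (d :: s) K := by
  have hlen : (part2_best s K).length = K := by
    rw [part2_best_length, Nat.min_eq_left h1]
  have hstar := part2_star (d :: part2_best s K) K (by simp [hlen])
  have htl : (part2_trim (d :: part2_best s K)).length = K := by
    rw [part2_trim_length _ (by simp)]; simp [hlen]
  rw [part2_best_of_le (le_of_eq htl)] at hstar
  rw [hstar, part2_best_cons d (le_of_eq hlen.symm) h2]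
  rw [part2_nest s K K le_rfl, part2_nest s K (K - 1) (by omega)]
  rw [part2_best_cons d h1 h2]

theorem part2_find_congr (m : Nat) (p q : Int → Bool)
    (hpq : ∀ i : Int, 1 ≤ i → i ≤ (m : Int) → p i = q i) :
    ((PySem.List.pyRange (m : Int) (-1) (-1)).find? p).getD 0
      = ((PySem.List.pyRange (m : Int) (-1) (-1)).find? q).getD 0 := by
  induction m with
  | zero =>
    rw [PySem.List.pyRange_neg_one_cons (by norm_num), PySem.List.pyRange_neg_one_eq_nil (by norm_num)]
    simp only [List.find?_cons, Nat.cast_zero]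
    cases hp : p 0 <;> cases hq : q 0 <;> simp
  | succ n ih =>
    rw [PySem.List.pyRange_neg_one_cons (by push_cast; omega)]
    have hps : p ((n : Int) + 1) = q ((n : Int) + 1) := hpq _ (by omega) (by push_cast; omega)
    push_cast
    simp only [List.find?_cons, hps]
    cases hq : q ((n : Int) + 1) with
    | true => simp
    | false =>
      simp only
      have hstep : ((n : Int) + 1 - 1) = (n : Int) := by ring
      rw [hstep]
      exact ih (fun i h1 h2 => hpq i h1 (by omega))

theorem part2_pred_append (l : List Int) (x : Int) (i : Int) (h1 : 1 ≤ i)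
    (h2 : i < (l.length : Int)) : part2_pred (l ++ [x]) i = part2_pred l i := by
  have e1 : PySem.List.pyGet? (l ++ [x]) (i - 1) = PySem.List.pyGet? l (i - 1) := by
    rw [PySem.List.pyGet?_of_nonneg (l ++ [x]) (show (0:Int) ≤ i - 1 by omega),
        PySem.List.pyGet?_of_nonneg l (show (0:Int) ≤ i - 1 by omega),
        List.getElem?_append_left (by omega)]
  have e2 : PySem.List.pyGet? (l ++ [x]) i = PySem.List.pyGet? l i := by
    rw [PySem.List.pyGet?_of_nonneg (l ++ [x]) (show (0:Int) ≤ i by omega),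
        PySem.List.pyGet?_of_nonneg l (show (0:Int) ≤ i by omega),
        List.getElem?_append_left (by omega)]
  unfold part2_pred
  rw [e1, e2]

theorem part2_scan (o : List Int) (h : o ≠ []) :
    ((PySem.List.pyRange ((o.length : Int) - 1) (-1) (-1)).find? (part2_pred o.reverse)).getD 0
      = ((o.length - 1 - part2_J o : Nat) : Int) := by
  induction o using part2_J.induct with
  | case1 => simp at h
  | case2 x =>
    simp only [List.length_cons, List.length_nil, List.reverse_cons, List.reverse_nil,
      List.nil_append]
    norm_num
    rw [PySem.List.pyRange_neg_one_cons (by norm_num), PySem.List.pyRange_neg_one_eq_nil (by norm_num)]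
    have hp : part2_pred [x] 0 = false := by
      unfold part2_pred
      rw [show (0 : Int) - 1 = -1 by ring, PySem.List.pyGet?_neg_one]
      simp
    simp [hp]
  | case3 a b t hab =>
    -- first scanned index hits the ascent immediately
    have hrev : (a :: b :: t).reverse = (b :: t).reverse ++ [a] := by simp
    have hlen : ((a :: b :: t).length : Int) - 1 = (((b :: t).reverse.length : Nat) : Int) := by
      simp
    rw [hlen, PySem.List.pyRange_neg_one_cons (by omega)]
    have hp : part2_pred (a :: b :: t).reverse (((b :: t).reverse.length : Nat) : Int) = true := by
      unfold part2_pred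
      rw [hrev, PySem.List.pyGet?_append_length]
      have : (((b :: t).reverse.length : Nat) : Int) - 1 = ((t.reverse.length : Nat) : Int) := by
        simp
      rw [this]
      have hsplit : (b :: t).reverse ++ [a] = t.reverse ++ b :: [a] := by simp
      rw [hsplit, PySem.List.pyGet?_append_length]
      simpa using hab
    rw [List.find?_cons, hp]
    simp only [Option.getD_some, part2_J, if_pos hab]
    simp
  | case4 a b t hab ih =>
    have hrev : (a :: b :: t).reverse = (b :: t).reverse ++ [a] := by simp
    have hlen : ((a :: b :: t).length : Int) - 1 = (((b :: t).reverse.length : Nat) : Int) := by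
      simp
    rw [hlen, PySem.List.pyRange_neg_one_cons (by omega)]
    have hp : part2_pred (a :: b :: t).reverse (((b :: t).reverse.length : Nat) : Int) = false := by
      unfold part2_pred
      rw [hrev, PySem.List.pyGet?_append_length]
      have : (((b :: t).reverse.length : Nat) : Int) - 1 = ((t.reverse.length : Nat) : Int) := by
        simp
      rw [this]
      have hsplit : (b :: t).reverse ++ [a] = t.reverse ++ b :: [a] := by simp
      rw [hsplit, PySem.List.pyGet?_append_length]
      simpa using hab
    rw [List.find?_cons, hp]
    -- remaining range: down from |b::t| - 1; predicates agree there with the shorter list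
    have hrange : (((b :: t).reverse.length : Nat) : Int) - 1 = (((b :: t).length : Int)) - 1 := by
      simp
    have hcongr := part2_find_congr ((b :: t).length - 1)
      (part2_pred (a :: b :: t).reverse) (part2_pred (b :: t).reverse)
      (fun i h1 h2 => by
        rw [hrev]
        exact part2_pred_append _ _ i h1 (by simp at h2 ⊢; omega))
    have hcast : ((((b :: t).length - 1 : Nat)) : Int) = (((b :: t).reverse.length : Nat) : Int) - 1 := by
      simp
    rw [hcast] at hcongr
    rw [hcongr]
    have hih := ih (by simp)
    have hcast2 : (((b :: t).length : Int)) - 1 = (((b :: t).reverse.length : Nat) : Int) - 1 := by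
      simp
    rw [hcast2] at hih
    rw [hih]
    have hJ := part2_J_lt (b :: t) (by simp)
    have : part2_J (a :: b :: t) = part2_J (b :: t) + 1 := by
      simp [part2_J, if_neg hab]
    rw [this]
    congr 1
    simp only [List.length_cons] at hJ ⊢
    omega

-- reversing swaps eraseIdx position j ↔ length - 1 - j
theorem part2_eraseIdx_reverse (o : List Int) (j : Nat) (h : j < o.length) :
    o.reverse.eraseIdx (o.length - 1 - j) = (o.eraseIdx j).reverse := by
  induction o generalizing j with
  | nil => simp at h
  | cons a t ih =>
    cases j with
    | zero =>
      simp only [List.reverse_cons, List.eraseIdx_cons_zero, Nat.sub_zero, List.length_cons,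
        Nat.add_sub_cancel]
      rw [show t.length = t.reverse.length by simp]
      rw [List.eraseIdx_append_of_length_le le_rfl]
      simp
    | succ j' =>
      have hj' : j' < t.length := by simp at h; omega
      simp only [List.reverse_cons, List.eraseIdx_cons_succ, List.length_cons]
      have hidx : t.length + 1 - 1 - (j' + 1) = t.length - 1 - j' := by omega
      rw [hidx]
      rw [List.eraseIdx_append_of_lt_length (by simp; omega) _]
      rw [ih j' hj']

-- one full step of A's inner loop, seen on the reversed (original-order) window
theorem part2_stepA_eq (s : List Int) (d : Int) :
    part2_stepA ((part2_best s 12).reverse) d = (part2_best (d :: s) 12).reverse := by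
  have hlen : (part2_best s 12).length = min 12 s.length := part2_best_length s 12
  have hrev : (part2_best s 12).reverse ++ [d] = (d :: part2_best s 12).reverse := by simp
  unfold part2_stepA
  rw [hrev]
  by_cases hs : s.length < 12
  · rw [if_neg (by simp [hlen]; omega)]
    rw [part2_best_of_le (by omega), part2_best_of_le (by simp; omega)]
  · have h12 : (part2_best s 12).length = 12 := by rw [hlen]; omega
    set o : List Int := d :: part2_best s 12 with ho
    have holen : o.length = 13 := by simp [ho, h12]
    rw [if_pos (by simp [holen])]
    have hpred : (fun i =>
        match PySem.List.pyGet? o.reverse (i - 1), PySem.List.pyGet? o.reverse i with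
        | some a, some b => decide (a > b)
        | _, _ => false) = part2_pred o.reverse := rfl
    have hlen2 : ((o.reverse.length : Int) - 1) = ((o.length : Int) - 1) := by simp
    rw [hpred, hlen2, part2_scan o (by simp [ho])]
    have hJ : part2_J o < o.length := part2_J_lt o (by simp [ho])
    have hidx : o.length - 1 - part2_J o < o.reverse.length := by simp; omega
    dsimp only
    rw [PySem.List.pop?_natCast _ _ hidx]
    dsimp only
    rw [part2_eraseIdx_reverse o (part2_J o) hJ]
    rw [← part2_trim_eq_eraseIdx]
    rw [part2_astep d (by omega) (by omega)]

theorem part2_foldA (l : List Int) : ∀ (s : List Int),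
    l.foldl part2_stepA ((part2_best s 12).reverse) = (part2_best (l.reverse ++ s) 12).reverse := by
  induction l with
  | nil => intro s; simp
  | cons d l ih =>
    intro s
    rw [List.foldl_cons, part2_stepA_eq s d, ih (d :: s)]
    simp

theorem part2_resultA (bank : List Int) :
    bank.reverse.foldl part2_stepA [] = (part2_best bank 12).reverse := by
  have h0 : ([] : List Int) = (part2_best [] 12).reverse := rfl
  rw [h0, part2_foldA]
  simp

-- B side
theorem part2_range_map_getD (f : Nat → List Int) (k : Nat) (h : k < 13) :
    ((List.range 13).map f).getD k [] = f k := by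
  rw [List.getD_eq_getElem?_getD, List.getElem?_map, List.getElem?_range h]
  rfl

theorem part2_stepB_eq (s : List Int) (d : Int) :
    part2_stepB ((List.range 13).map (fun k => part2_best s k), s.length) d
      = ((List.range 13).map (fun k => part2_best (d :: s) k), s.length + 1) := by
  unfold part2_stepB
  simp only [Prod.mk.injEq]
  refine ⟨List.map_congr_left (fun k hk => ?_), trivial⟩
  have hk13 : k < 13 := List.mem_range.mp hk
  by_cases hk0 : k = 0
  · subst hk0; simp [part2_best_zero]
  · rw [if_neg hk0]
    by_cases hsk : s.length < k
    · rw [if_pos hsk, part2_range_map_getD _ _ hk13]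
      rw [part2_best_of_le (by omega), part2_best_of_le (by simp; omega)]
    · rw [if_neg hsk]
      rw [part2_range_map_getD _ _ hk13, part2_range_map_getD _ _ (by omega)]
      rw [part2_best_cons d (by omega) hk0]
      rfl

theorem part2_foldB (l : List Int) : ∀ (s : List Int),
    l.foldl part2_stepB ((List.range 13).map (fun k => part2_best s k), s.length)
      = ((List.range 13).map (fun k => part2_best (l.reverse ++ s) k), (l.reverse ++ s).length) := by
  induction l with
  | nil => intro s; simp
  | cons d l ih =>
    intro s
    rw [List.foldl_cons, part2_stepB_eq s d]
    have h1 : (s.length + 1) = (d :: s).length := rfl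
    rw [h1, ih (d :: s)]
    simp

theorem part2_resultB (bank : List Int) :
    bank.reverse.foldl part2_stepB ((List.range 13).map (fun _ => ([] : List Int)), 0)
      = ((List.range 13).map (fun k => part2_best bank k), bank.length) := by
  have h0 : ((List.range 13).map (fun _ => ([] : List Int)), 0)
      = ((List.range 13).map (fun k => part2_best ([] : List Int) k), ([] : List Int).length) := by
    simp [part2_best]
  rw [h0, part2_foldB]
  simp

theorem part2_fold_banks (banks : List (List Int)) : ∀ (t : Int),
    banks.foldl (fun total_joltage bank =>
      let result := bank.reverse.foldl part2_stepA []
      let joltage := result.reverse.foldl (fun j d => j * 10 + d) 0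
      total_joltage + joltage) t
    = banks.foldl (fun total_joltage bank =>
      let st := bank.reverse.foldl part2_stepB ((List.range 13).map (fun _ => ([] : List Int)), 0)
      let joltage := (st.1.getD 12 []).foldl (fun j d => j * 10 + d) 0
      total_joltage + joltage) t := by
  induction banks with
  | nil => intro t; rfl
  | cons bank banks ih =>
    intro t
    rw [List.foldl_cons, List.foldl_cons]
    have hb : (t + (bank.reverse.foldl part2_stepA []).reverse.foldl (fun j d => j * 10 + d) 0)
        = (t + ((bank.reverse.foldl part2_stepB ((List.range 13).map (fun _ => ([] : List Int)), 0)).1.getD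
              12 []).foldl (fun j d => j * 10 + d) 0) := by
      rw [part2_resultA, part2_resultB]
      dsimp only
      rw [part2_range_map_getD _ _ (by omega)]
      simp
    dsimp only
    rw [hb]
    exact ih _

theorem part2_eq_alt (banks : List (List Int)) : part2 banks = part2_alt banks := by
  unfold part2 part2_alt
  exact part2_fold_banks banks 0

-- ===== VERDICT (by name: the statement is the Claim_ definition above) =====
theorem part2_spec : Claim_equal_part2 := by
  intro banks _
  unfold Spec_part2
  exact part2_eq_alt banks
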